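-- pv_equiv track=rewrite | github.com/tupkalenkodi/dbfbd_spark_hir_graphs_identification | python_scripts/generate.py | decode_graph6
-- ===== SOURCE A (Python) =====
-- def decode_graph6(graph6_str: str):
--     n = ord(graph6_str[0]) - 63
--     s = graph6_str[1:]
--     total_bits = n * (n - 1) // 2
--
--     all_bits = []
--     for ch in s:
--         c = ord(ch) - 63
--         all_bits.extend([(c >> (5 - i)) & 1 for i in range(6)])
--
--     bits = all_bits[:total_bits]
--     edges = []
--     bit_idx = 0
--
--     for j in range(1, n):
--         for i in range(j):
--             if bit_idx < len(bits):
--                 if bits[bit_idx] == 1: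
--                     edges.append([int(i), int(j)])
--             else:
--                 break
--             bit_idx += 1
--         if bit_idx >= len(bits):
--             break
--
--     return edges, n
-- ===== SOURCE B (Python) =====
-- def decode_graph6(graph6_str: str):
--     n = ord(graph6_str[0]) - 63
--     s = graph6_str[1:]
--     nbits = 6 * len(s)
--     edges = []
--     i, j, k = 0, 1, 0
--     while j < n and k < nbits:
--         if (ord(s[k // 6]) - 63 >> (5 - k % 6)) & 1:
--             edges.append([i, j])
--         k += 1
--         i += 1
--         if i == j:
--             i, j = 0, j + 1
--     return edges, n
-- ===== Notes on version B (the rewrite author's own statement) =====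
-- stated objective: faster
-- what changed: B replaces A's two-pass design (materialize the full 6-bits-per-char list, truncate, then a nested i/j loop with breaks) by a single flat while-loop over a running bit index k that decodes each needed bit directly from character s[k//6] and advances the pair (i,j) in place, so no bit list is built and no bits beyond the edge pairs are decoded.
import Mathlib
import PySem

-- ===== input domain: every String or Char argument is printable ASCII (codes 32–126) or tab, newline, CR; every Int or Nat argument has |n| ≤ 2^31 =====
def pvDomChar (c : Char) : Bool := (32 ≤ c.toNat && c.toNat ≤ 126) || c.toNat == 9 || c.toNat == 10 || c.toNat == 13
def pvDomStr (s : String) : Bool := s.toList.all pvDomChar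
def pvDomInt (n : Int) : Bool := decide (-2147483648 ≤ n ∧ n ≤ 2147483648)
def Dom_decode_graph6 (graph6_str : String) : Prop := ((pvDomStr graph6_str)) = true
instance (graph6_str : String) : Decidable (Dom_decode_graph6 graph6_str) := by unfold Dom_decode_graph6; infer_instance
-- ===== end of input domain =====

-- B decodes each bit directly from its character with one flat loop over a running bit index,
-- never materializing A's intermediate bit list; equal return value wherever A returns
-- (both raise IndexError on the empty string, excluded by Pre_).

-- ===== PORT A =====

-- Python's `(c >> m) & 1` for an arbitrary int c: arithmetic shift = floor division by 2^m,
-- then `& 1` = mod 2; exact for every Int c and Nat m.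
def pyBit (c : Int) (m : Nat) : Int :=
  PySem.Int.mod (PySem.Int.floordiv c ((2 : Int) ^ m)) 2

-- `[(c >> (5 - i)) & 1 for i in range(6)]` with c = ord(ch) - 63
def bitsOfChar (ch : Char) : List Int :=
  (PySem.List.pyRange 0 6 1).map (fun i => pyBit ((ch.toNat : Int) - 63) (5 - i).toNat)

-- inner `for i in range(j)` loop; returns (edges, bit_idx), stopping (break) once bit_idx
-- reaches len(bits)
def innerA (bits : List Int) (j : Int) : List Int → List (List Int) → Nat → List (List Int) × Nat
  | [], edges, idx => (edges, idx)
  | i :: rest, edges, idx =>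
    if idx < bits.length then
      innerA bits j rest (if bits.getD idx 0 = 1 then edges ++ [[i, j]] else edges) (idx + 1)
    else (edges, idx)

-- outer `for j in range(1, n)` loop with its `if bit_idx >= len(bits): break`
def outerA (bits : List Int) : List Int → List (List Int) → Nat → List (List Int)
  | [], edges, _ => edges
  | j :: rest, edges, idx =>
    let p := innerA bits j (PySem.List.pyRange 0 j 1) edges idx
    if bits.length ≤ p.2 then p.1 else outerA bits rest p.1 p.2

def decode_graph6 (graph6_str : String) : List (List Int) × Int :=
  match graph6_str.toList with
  | [] => ([], 0)  -- Python raises IndexError on graph6_str[0]; excluded by Pre_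
  | c0 :: sc =>
    let n : Int := (c0.toNat : Int) - 63
    let total : Int := PySem.Int.floordiv (n * (n - 1)) 2
    let all_bits : List Int := sc.foldl (fun acc ch => acc ++ bitsOfChar ch) []
    let bits : List Int := PySem.List.slice all_bits none (some total)
    (outerA bits (PySem.List.pyRange 1 n 1) [] 0, n)

-- ===== PORT B =====

-- the `while j < n and k < nbits` loop of Source B
def altLoop (sc : List Char) (n : Int) (nbits : Nat) (edges : List (List Int))
    (i j : Int) (k : Nat) : List (List Int) :=
  if h : j < n ∧ k < nbits then
    let c : Int := ((sc.getD (k / 6) ' ').toNat : Int) - 63  -- s[k // 6]; in range since k < 6*len(s)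
    let edges' := if pyBit c (5 - k % 6) = 1 then edges ++ [[i, j]] else edges
    if i + 1 = j then altLoop sc n nbits edges' 0 (j + 1) (k + 1)
    else altLoop sc n nbits edges' (i + 1) j (k + 1)
  else edges
termination_by nbits - k
decreasing_by all_goals omega

def decode_graph6_alt (graph6_str : String) : List (List Int) × Int :=
  match graph6_str.toList with
  | [] => ([], 0)  -- Python raises IndexError on graph6_str[0]; excluded by Pre_
  | c0 :: sc =>
    let n : Int := (c0.toNat : Int) - 63
    (altLoop sc n (6 * sc.length) [] 0 1 0, n)

-- ===== PRECONDITION & SPEC =====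
-- A raises IndexError on the empty string (graph6_str[0]); that is its only exception.
def Pre_decode_graph6 (graph6_str : String) : Prop := graph6_str ≠ ""
instance (graph6_str : String) : Decidable (Pre_decode_graph6 graph6_str) := by
  unfold Pre_decode_graph6; infer_instance

def pvWitness_decode_graph6 : String := "D?AK"

def Spec_decode_graph6 (graph6_str : String) (out : List (List Int) × Int) : Prop := out = decode_graph6_alt graph6_str
instance (graph6_str : String) (out : List (List Int) × Int) : Decidable (Spec_decode_graph6 graph6_str out) := by unfold Spec_decode_graph6; infer_instance

-- ===== CLAIM (what is proved, stated in full; the proofs are below) =====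
def Claim_equal_decode_graph6 : Prop := ∀ (graph6_str : String), Dom_decode_graph6 graph6_str → Pre_decode_graph6 graph6_str → Spec_decode_graph6 graph6_str (decode_graph6 graph6_str)

-- ===== LEMMAS AND PROOFS =====

-- common reference: consume one bit per pair, in order, until bits or pairs run out
def collect : List Int → List (Int × Int) → List (List Int)
  | [], _ => []
  | _ :: _, [] => []
  | b :: bs, p :: ps => (if b = 1 then [[p.1, p.2]] else []) ++ collect bs ps

def rowOf (j : Int) : List (Int × Int) := (PySem.List.pyRange 0 j 1).map (fun i => (i, j))

def pairsAll (n : Int) : List (Int × Int) := (PySem.List.pyRange 1 n 1).flatMap rowOf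

lemma collect_nil_left (ps : List (Int × Int)) : collect [] ps = [] := rfl

lemma collect_nil_right (bs : List Int) : collect bs [] = [] := by
  cases bs <;> rfl

lemma collect_append (ps qs : List (Int × Int)) (bs : List Int) :
    collect bs (ps ++ qs) = collect bs ps ++ collect (bs.drop ps.length) qs := by
  induction ps generalizing bs with
  | nil => simp [collect_nil_right]
  | cons p ps ih =>
    cases bs with
    | nil => simp [collect]
    | cons b bs => simp [collect, ih, List.append_assoc]

lemma innerA_eq (bits : List Int) (j : Int) :
    ∀ (is : List Int) (edges : List (List Int)) (idx : Nat), idx ≤ bits.length →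
    innerA bits j is edges idx
      = (edges ++ collect (bits.drop idx) (is.map (fun i => (i, j))),
         min (idx + is.length) bits.length) := by
  intro is
  induction is with
  | nil =>
    intro edges idx h
    simp [innerA, collect_nil_right, Nat.min_eq_left h]
  | cons i rest ih =>
    intro edges idx h
    by_cases hlt : idx < bits.length
    · rw [innerA, if_pos hlt, ih _ (idx + 1) (by omega)]
      have hdrop : bits.drop idx = bits[idx] :: bits.drop (idx + 1) :=
        List.drop_eq_getElem_cons hlt
      have hgd : bits.getD idx 0 = bits[idx] := List.getD_eq_getElem bits 0 hlt
      rw [hdrop]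
      simp only [List.map_cons, collect, hgd, Prod.mk.injEq]
      constructor
      · by_cases hb : bits[idx] = 1 <;> simp [hb, List.append_assoc]
      · simp only [List.length_cons]; omega
    · rw [innerA, if_neg hlt]
      have hidx : idx = bits.length := by omega
      subst hidx
      rw [List.drop_length]
      simp only [collect_nil_left, List.append_nil, Prod.mk.injEq, List.length_cons]
      exact ⟨trivial, by omega⟩

lemma outerA_eq (bits : List Int) :
    ∀ (js : List Int) (edges : List (List Int)) (idx : Nat), idx ≤ bits.length →
    outerA bits js edges idx = edges ++ collect (bits.drop idx) (js.flatMap rowOf) := by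
  intro js
  induction js with
  | nil => intro edges idx h; simp [outerA, collect_nil_right]
  | cons j rest ih =>
    intro edges idx h
    rw [outerA]
    simp only [innerA_eq bits j _ edges idx h]
    have hrow : (PySem.List.pyRange 0 j 1).map (fun i => (i, j)) = rowOf j := rfl
    set rl := (PySem.List.pyRange 0 j 1).length with hrl
    have hsplit : collect (bits.drop idx) ((j :: rest).flatMap rowOf)
        = collect (bits.drop idx) (rowOf j)
          ++ collect (bits.drop (idx + rl)) (rest.flatMap rowOf) := by
      rw [List.flatMap_cons, ← hrow, collect_append, List.drop_drop]
      simp only [List.length_map, ← hrl]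
    by_cases hstop : bits.length ≤ min (idx + rl) bits.length
    · rw [if_pos hstop]
      have hge : bits.length ≤ idx + rl := by omega
      have hnil : bits.drop (idx + rl) = [] := List.drop_eq_nil_of_le hge
      rw [hsplit, hnil, collect_nil_left, List.append_nil, hrow]
    · rw [if_neg hstop]
      have hlt : idx + rl < bits.length := by omega
      rw [Nat.min_eq_left (by omega)]
      rw [ih _ (idx + rl) (by omega), hsplit, hrow, List.append_assoc]

-- the exact sequence of (i, j) states B's loop walks through, as a relation
inductive PairSeq : Int → Int → Int → List (Int × Int) → Prop
  | stop {i j n : Int} : ¬ j < n → PairSeq i j n []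
  | mid {i j n : Int} {ps : List (Int × Int)} :
      j < n → i + 1 ≠ j → PairSeq (i + 1) j n ps → PairSeq i j n ((i, j) :: ps)
  | row {i j n : Int} {ps : List (Int × Int)} :
      j < n → i + 1 = j → PairSeq 0 (j + 1) n ps → PairSeq i j n ((i, j) :: ps)

lemma pairSeq_row (n : Int) :
    ∀ (d : Nat) (i j : Int) (ps : List (Int × Int)), i + d + 1 = j → j < n →
    PairSeq 0 (j + 1) n ps →
    PairSeq i j n (((PySem.List.pyRange i j 1).map (fun x => (x, j))) ++ ps) := by
  intro d
  induction d with
  | zero =>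
    intro i j ps hij hjn hnext
    have h1 : i < j := by omega
    rw [PySem.List.pyRange_one_cons h1, PySem.List.pyRange_one_eq_nil (by omega : j ≤ i + 1)]
    exact PairSeq.row hjn (by omega) hnext
  | succ d ih =>
    intro i j ps hij hjn hnext
    have h1 : i < j := by omega
    rw [PySem.List.pyRange_one_cons h1]
    simp only [List.map_cons, List.cons_append]
    exact PairSeq.mid hjn (by omega) (ih (i + 1) j ps (by omega) hjn hnext)

lemma pairSeq_all (n : Int) :
    ∀ (e : Nat) (j : Int), 1 ≤ j → e = (n - j).toNat →
    PairSeq 0 j n ((PySem.List.pyRange j n 1).flatMap rowOf) := by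
  intro e
  induction e with
  | zero =>
    intro j hj he
    rw [PySem.List.pyRange_one_eq_nil (by omega : n ≤ j)]
    exact PairSeq.stop (by omega)
  | succ e ih =>
    intro j hj he
    have hjn : j < n := by omega
    rw [PySem.List.pyRange_one_cons hjn, List.flatMap_cons]
    exact pairSeq_row n (j - 1).toNat 0 j _ (by omega) hjn (ih (j + 1) (by omega) (by omega))

lemma nn_nonneg (n : Int) : 0 ≤ n * (n - 1) := by
  rcases (by omega : n ≤ 0 ∨ 0 < n) with h | h
  · have h2 : 0 ≤ (-n) * (1 - n) := mul_nonneg (by omega) (by omega)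
    nlinarith
  · exact mul_nonneg (by omega) (by omega)

lemma pairsAll_len_aux (n : Int) :
    ∀ (e : Nat) (j : Int), 0 ≤ j → e = (n - j).toNat → j * (j - 1) ≤ n * (n - 1) →
    2 * (((PySem.List.pyRange j n 1).flatMap rowOf).length : Int)
      ≤ n * (n - 1) - j * (j - 1) := by
  intro e
  induction e with
  | zero =>
    intro j hj he hle
    rw [PySem.List.pyRange_one_eq_nil (by omega : n ≤ j)]
    simpa using hle
  | succ e ih =>
    intro j hj he hle
    have hjn : j < n := by omega
    rw [PySem.List.pyRange_one_cons hjn, List.flatMap_cons]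
    have hrow : ((rowOf j).length : Int) = j := by
      simp only [rowOf, List.length_map, PySem.List.length_pyRange_one]
      omega
    have hnext : (j + 1) * (j + 1 - 1) ≤ n * (n - 1) := by
      have h2 := mul_le_mul (by omega : j + 1 ≤ n) (by omega : j + 1 - 1 ≤ n - 1)
        (by omega : (0 : Int) ≤ j + 1 - 1) (by omega : (0 : Int) ≤ n)
      linarith
    have hih := ih (j + 1) (by omega) (by omega) hnext
    have hring : (j + 1) * (j + 1 - 1) = j * (j - 1) + 2 * j := by ring
    simp only [List.length_append]
    push_cast
    linarith

-- length of the flattened bit list: 6 bits per character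
lemma len_flat (sc : List Char) : (sc.flatMap bitsOfChar).length = 6 * sc.length := by
  induction sc with
  | nil => simp
  | cons ch rest ih =>
    have h6 : (bitsOfChar ch).length = 6 := by
      simp [bitsOfChar, PySem.List.length_pyRange_one]
    simp [List.flatMap_cons, h6, ih]
    omega

-- the m-th bit of A's flattened list is exactly the bit B reads from character m/6
lemma flat_get (sc : List Char) :
    ∀ (m : Nat), m < 6 * sc.length →
    (sc.flatMap bitsOfChar).getD m 0
      = pyBit (((sc.getD (m / 6) ' ').toNat : Int) - 63) (5 - m % 6) := by
  induction sc with
  | nil => intro m h; simp at h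
  | cons ch rest ih =>
    intro m h
    simp only [List.length_cons] at h
    have h6 : (bitsOfChar ch).length = 6 := by
      simp [bitsOfChar, PySem.List.length_pyRange_one]
    rw [List.flatMap_cons]
    by_cases hm : m < 6
    · rw [List.getD_append _ _ _ _ (by omega)]
      have hdiv : m / 6 = 0 := by omega
      have hmod : m % 6 = m := by omega
      rw [hdiv, hmod, List.getD_cons_zero]
      have hpr : PySem.List.pyRange 0 6 1 = [0, 1, 2, 3, 4, 5] := by decide
      interval_cases m <;> simp [bitsOfChar, hpr, List.getD]
    · rw [List.getD_append_right _ _ _ _ (by omega)]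
      have hrec := ih (m - 6) (by omega)
      have e1 : (m - 6) / 6 = m / 6 - 1 := by omega
      have e2 : (m - 6) % 6 = m % 6 := by omega
      obtain ⟨q, hq⟩ : ∃ q, m / 6 = q + 1 := ⟨m / 6 - 1, by omega⟩
      rw [h6, hrec, e1, e2, hq]
      simp only [Nat.add_sub_cancel, List.getD_cons_succ]

lemma getD_take (l : List Int) :
    ∀ (n m : Nat), m < n → (l.take n).getD m 0 = l.getD m 0 := by
  induction l with
  | nil => intro n m _; simp
  | cons x xs ih =>
    intro n m hmn
    cases n with
    | zero => omega
    | succ n =>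
      cases m with
      | zero => simp
      | succ m => simpa using ih n m (by omega)

-- B's loop computes `collect` over the (abstractly characterized) truncated bit list
lemma altLoop_eq (sc : List Char) (n : Int) (nbits totalN : Nat) (bits : List Int)
    (hlen : bits.length = min totalN nbits)
    (hget : ∀ m : Nat, m < bits.length →
      bits.getD m 0 = pyBit (((sc.getD (m / 6) ' ').toNat : Int) - 63) (5 - m % 6)) :
    ∀ {i j : Int} {ps : List (Int × Int)}, PairSeq i j n ps →
    ∀ (k : Nat) (edges : List (List Int)), k + ps.length ≤ totalN →
    altLoop sc n nbits edges i j k = edges ++ collect (bits.drop k) ps := by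
  intro i j ps hps
  induction hps with
  | stop hjn =>
    intro k edges _
    rw [altLoop, dif_neg (by tauto)]
    rw [collect_nil_right, List.append_nil]
  | mid hjn hne hrec ih =>
    intro k edges hcnt
    simp only [List.length_cons] at hcnt
    by_cases hk : k < nbits
    · rw [altLoop, dif_pos ⟨hjn, hk⟩]
      simp only []
      have hklen : k < bits.length := by omega
      have hdrop : bits.drop k = bits[k] :: bits.drop (k + 1) :=
        List.drop_eq_getElem_cons hklen
      have hbit : pyBit (((sc.getD (k / 6) ' ').toNat : Int) - 63) (5 - k % 6) = bits[k] := by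
        rw [← hget k hklen, List.getD_eq_getElem bits 0 hklen]
      rw [if_neg hne, ih (k + 1) _ (by omega), hdrop]
      simp only [collect, hbit]
      by_cases hb : bits[k] = 1 <;> simp [hb, List.append_assoc]
    · rw [altLoop, dif_neg (by tauto)]
      have hnil : bits.drop k = [] := List.drop_eq_nil_of_le (by omega)
      rw [hnil, collect_nil_left, List.append_nil]
  | row hjn heq hrec ih =>
    intro k edges hcnt
    simp only [List.length_cons] at hcnt
    by_cases hk : k < nbits
    · rw [altLoop, dif_pos ⟨hjn, hk⟩]
      simp only []
      have hklen : k < bits.length := by omega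
      have hdrop : bits.drop k = bits[k] :: bits.drop (k + 1) :=
        List.drop_eq_getElem_cons hklen
      have hbit : pyBit (((sc.getD (k / 6) ' ').toNat : Int) - 63) (5 - k % 6) = bits[k] := by
        rw [← hget k hklen, List.getD_eq_getElem bits 0 hklen]
      rw [if_pos heq, ih (k + 1) _ (by omega), hdrop]
      simp only [collect, hbit]
      by_cases hb : bits[k] = 1 <;> simp [hb, List.append_assoc]
    · rw [altLoop, dif_neg (by tauto)]
      have hnil : bits.drop k = [] := List.drop_eq_nil_of_le (by omega)
      rw [hnil, collect_nil_left, List.append_nil]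

lemma toList_ne_nil (g : String) (h : g ≠ "") : g.toList ≠ [] := by
  intro hc
  apply h
  have h2 := congrArg String.ofList hc
  simpa using h2

-- ===== VERDICT (by name: the statement is the Claim_ definition above) =====
theorem decode_graph6_spec : Claim_equal_decode_graph6 := by
  intro g _ hpre
  unfold Spec_decode_graph6
  obtain ⟨c0, sc, hg⟩ : ∃ c0 sc, g.toList = c0 :: sc := by
    cases hgl : g.toList with
    | nil => exact absurd hgl (toList_ne_nil g hpre)
    | cons a l => exact ⟨a, l, rfl⟩
  unfold decode_graph6 decode_graph6_alt
  rw [hg]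
  simp only []
  set n : Int := (c0.toNat : Int) - 63 with hn
  set total : Int := PySem.Int.floordiv (n * (n - 1)) 2 with htotal
  set all : List Int := sc.foldl (fun acc ch => acc ++ bitsOfChar ch) [] with hall
  have htot0 : 0 ≤ total := by
    rw [htotal, PySem.Int.floordiv_eq_ediv_of_pos (by norm_num)]
    exact Int.ediv_nonneg (nn_nonneg n) (by norm_num)
  have hallflat : all = sc.flatMap bitsOfChar := by
    rw [hall]
    simpa using PySem.List.foldl_append_eq_flatMap (g := bitsOfChar) (l := sc) (acc := [])
  set totalN : Nat := total.toNat with htotalN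
  have hslice : PySem.List.slice all none (some total) = all.take totalN :=
    PySem.List.slice_to all htot0
  set bits : List Int := all.take totalN with hbits
  have hlenall : all.length = 6 * sc.length := by rw [hallflat, len_flat]
  have hlenbits : bits.length = min totalN (6 * sc.length) := by
    rw [hbits, List.length_take, hlenall]
  have hget : ∀ m : Nat, m < bits.length →
      bits.getD m 0 = pyBit (((sc.getD (m / 6) ' ').toNat : Int) - 63) (5 - m % 6) := by
    intro m hm
    rw [hlenbits] at hm
    rw [hbits, getD_take all totalN m (by omega), hallflat, flat_get sc m (by omega)]
  have hcnt : (pairsAll n).length ≤ totalN := by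
    have h2 := pairsAll_len_aux n (n - 1).toNat 1 (by omega) (by omega) (by
      simpa using nn_nonneg n)
    have hL : ((pairsAll n).length : Int) ≤ total := by
      rw [htotal, PySem.Int.floordiv_eq_ediv_of_pos (by norm_num)]
      rw [Int.le_ediv_iff_mul_le (by norm_num)]
      unfold pairsAll
      linarith [h2]
    omega
  have hPS : PairSeq 0 1 n (pairsAll n) := pairSeq_all n (n - 1).toNat 1 (by omega) rfl
  have hA : outerA (PySem.List.slice all none (some total)) (PySem.List.pyRange 1 n 1) [] 0
      = collect bits (pairsAll n) := by
    rw [hslice, outerA_eq bits _ [] 0 (by omega)]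
    simp [pairsAll]
  have hB : altLoop sc n (6 * sc.length) [] 0 1 0 = collect bits (pairsAll n) := by
    rw [altLoop_eq sc n (6 * sc.length) totalN bits hlenbits hget hPS 0 [] (by omega)]
    simp
  rw [hA, hB]
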